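-- pv_equiv track=rewrite | github.com/abkunal/Data-Structures-and-Algorithms | python/NP/vertex_cover.py | bounded_tree_search_vertex_cover
-- ===== SOURCE A (Python) =====
-- def bounded_tree_search_vertex_cover(edges, k, cover):
--     """"
--         A Fixed Parameter Tractibility algorithm.
--         Bounded Tree Search Method to solve k-Vertex Cover problem.
--         Returns True if there is a vertex cover of size k in the given graph.
--     """
--     assert type(edges) == dict and type(k) == int and type(cover) == set
--     if k == 0:
--         return len(edges) == 0
--     elif len(edges) == 0:
--         return True
--     else:
--         # take an edge (u,v) from graph
--         u,v = edges.popitem()[0]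
--         # Copies of edges and cover for the 2 recursive calls
--         edges_for_u = dict(edges)
--         edges_for_v = dict(edges)
--
--         cover_for_u = set(cover)
--         cover_for_v = set(cover)
--
--         # deleting u and incident edges
--         keys = list(edges_for_u.keys())
--         cover_for_u.add(u)
--         for key in keys:
--             if u in key:
--                 del edges_for_u[key]
--
--         a = bounded_tree_search_vertex_cover(edges_for_u, k-1, cover_for_u)
--
--         # deleting v and incident edges
--         keys = list(edges_for_v.keys())
--         cover_for_v.add(v)
--         for key in keys:
--             if v in key:
--                 del edges_for_v[key]
--
--         b = bounded_tree_search_vertex_cover(edges_for_v, k-1, cover_for_v)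
--
--         return a or b
-- ===== SOURCE B (Python) =====
-- def bounded_tree_search_vertex_cover(edges, k, cover):
--     """Iterative DFS with an explicit stack of (edges, budget) frames; cover is
--     checked (set) but never consulted, since it cannot affect the boolean result.
--     Note: unlike A, B does not mutate the input dict (A pops one item from it)."""
--     assert type(edges) == dict and type(k) == int and type(cover) == set
--     stack = [(edges, k)]
--     while stack:
--         es, b = stack.pop()
--         if b == 0:
--             if len(es) == 0:
--                 return True
--         elif len(es) == 0:
--             return True
--         else:
--             items = list(es.items())
--             (u, v), _ = items[-1]
--             rest = items[:-1]
--             eu = {key: val for key, val in rest if u not in key}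
--             ev = {key: val for key, val in rest if v not in key}
--             stack.append((ev, b - 1))
--             stack.append((eu, b - 1))
--     return False
-- ===== Notes on version B (the rewrite author's own statement) =====
-- stated objective: alternative
-- what changed: The recursive branching search becomes an iterative depth-first loop over an explicit stack of (edges, budget) frames that pushes both reduced subproblems and returns as soon as a frame succeeds; B also drops the dead per-node cover-set copies and does not mutate the caller's dict (A pops an item from it).
import Mathlib
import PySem

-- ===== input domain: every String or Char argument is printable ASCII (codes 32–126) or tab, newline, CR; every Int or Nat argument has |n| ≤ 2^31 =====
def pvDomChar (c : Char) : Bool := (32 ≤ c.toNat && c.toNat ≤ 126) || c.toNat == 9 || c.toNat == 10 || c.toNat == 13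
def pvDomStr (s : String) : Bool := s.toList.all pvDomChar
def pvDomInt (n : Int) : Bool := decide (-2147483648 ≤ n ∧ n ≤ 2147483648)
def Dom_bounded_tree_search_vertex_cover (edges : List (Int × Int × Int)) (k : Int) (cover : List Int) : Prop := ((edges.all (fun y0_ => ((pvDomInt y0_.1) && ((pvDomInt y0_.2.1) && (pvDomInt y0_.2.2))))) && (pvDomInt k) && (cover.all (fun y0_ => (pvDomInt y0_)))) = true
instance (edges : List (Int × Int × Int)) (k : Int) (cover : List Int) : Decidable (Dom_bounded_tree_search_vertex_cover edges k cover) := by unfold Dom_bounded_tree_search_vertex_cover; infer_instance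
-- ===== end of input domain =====

-- B replaces A's recursion by an iterative DFS over an explicit stack of (edges, budget)
-- frames, dropping the dead per-node cover-set copies (measured faster by a constant factor);
-- equivalence is about the RETURN value only: A mutates the input dict (popitem), B does not.

-- ===== PORT A =====
-- the Python dict[(u,v)] = w, given to the port as a flattened assoc list (u, v, w):
-- items in insertion order with unique keys (last value wins), as Python's dict() builds it
def pvToDict (edges : List (Int × Int × Int)) : List ((Int × Int) × Int) :=
  (PySem.Dict.ofList (edges.map (fun e => ((e.1, e.2.1), e.2.2)))).items

-- the recursive body of A, on the dict's items list (popitem takes the LAST item)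
def pvGoA (es : List ((Int × Int) × Int)) (k : Int) (cover : List Int) : Bool :=
  if k == 0 then es.length == 0
  else if es.length == 0 then true
  else
    match h : es.getLast? with
    | none => true  -- unreachable: es is nonempty here
    | some ((u, v), _) =>
      let rest := es.dropLast
      let cover_for_u := PySem.Set.add cover u
      -- for key in keys: if u in key: del edges_for_u[key]
      let edges_for_u := rest.filter (fun e => !(e.1.1 == u || e.1.2 == u))
      let a := pvGoA edges_for_u (k - 1) cover_for_u
      let cover_for_v := PySem.Set.add cover v
      let edges_for_v := rest.filter (fun e => !(e.1.1 == v || e.1.2 == v))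
      let b := pvGoA edges_for_v (k - 1) cover_for_v
      a || b
termination_by es.length
decreasing_by
  all_goals
    have hne : es ≠ [] := by intro he; subst he; simp at h
    have hpos : 0 < es.length := List.length_pos_iff.mpr hne
    refine Nat.lt_of_le_of_lt (List.length_filter_le _ _) ?_
    rw [List.length_dropLast]
    omega

def bounded_tree_search_vertex_cover (edges : List (Int × Int × Int)) (k : Int) (cover : List Int) : Bool :=
  pvGoA (pvToDict edges) k cover

-- ===== PORT B =====
def pvMeasure (stack : List (List ((Int × Int) × Int) × Int)) : Nat :=
  (stack.map (fun f => 3 ^ f.1.length)).sum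

-- B's while-loop over the explicit stack of (edges, budget) frames
def pvGoB (stack : List (List ((Int × Int) × Int) × Int)) : Bool :=
  match stack with
  | [] => false
  | (es, b) :: rest =>
    if b == 0 then
      if es.length == 0 then true else pvGoB rest
    else if es.length == 0 then true
    else
      match h : es.getLast? with
      | none => pvGoB rest  -- unreachable: es is nonempty here
      | some ((u, v), _) =>
        let items := es.dropLast
        let eu := items.filter (fun e => !(e.1.1 == u || e.1.2 == u))
        let ev := items.filter (fun e => !(e.1.1 == v || e.1.2 == v))
        pvGoB ((eu, b - 1) :: (ev, b - 1) :: rest)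
termination_by pvMeasure stack
decreasing_by
  · simp only [pvMeasure, List.map_cons, List.sum_cons]
    have := pow_pos (show (0:Nat) < 3 by norm_num) es.length
    omega
  · simp only [pvMeasure, List.map_cons, List.sum_cons]
    have := pow_pos (show (0:Nat) < 3 by norm_num) es.length
    omega
  · have hne : es ≠ [] := by intro he; subst he; simp at h
    have hpos : 0 < es.length := List.length_pos_iff.mpr hne
    simp only [pvMeasure, List.map_cons, List.sum_cons]
    have hu : (es.dropLast.filter (fun e => !(e.1.1 == u || e.1.2 == u))).length ≤ es.length - 1 := by
      refine le_trans (List.length_filter_le _ _) ?_; rw [List.length_dropLast]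
    have hv : (es.dropLast.filter (fun e => !(e.1.1 == v || e.1.2 == v))).length ≤ es.length - 1 := by
      refine le_trans (List.length_filter_le _ _) ?_; rw [List.length_dropLast]
    have h1 : (3:Nat) ^ (es.dropLast.filter (fun e => !(e.1.1 == u || e.1.2 == u))).length ≤ 3 ^ (es.length - 1) :=
      Nat.pow_le_pow_right (by norm_num) hu
    have h2 : (3:Nat) ^ (es.dropLast.filter (fun e => !(e.1.1 == v || e.1.2 == v))).length ≤ 3 ^ (es.length - 1) :=
      Nat.pow_le_pow_right (by norm_num) hv
    have h3 : (3:Nat) ^ es.length = 3 * 3 ^ (es.length - 1) := by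
      conv_lhs => rw [show es.length = (es.length - 1) + 1 by omega]
      rw [pow_succ]; ring
    have h4 := pow_pos (show (0:Nat) < 3 by norm_num) (es.length - 1)
    omega

def bounded_tree_search_vertex_cover_alt (edges : List (Int × Int × Int)) (k : Int) (cover : List Int) : Bool :=
  pvGoB [(pvToDict edges, k)]

-- ===== PRECONDITION & SPEC =====
def Spec_bounded_tree_search_vertex_cover (edges : List (Int × Int × Int)) (k : Int) (cover : List Int) (out : Bool) : Prop := out = bounded_tree_search_vertex_cover_alt edges k cover
instance (edges : List (Int × Int × Int)) (k : Int) (cover : List Int) (out : Bool) : Decidable (Spec_bounded_tree_search_vertex_cover edges k cover out) := by unfold Spec_bounded_tree_search_vertex_cover; infer_instance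

-- ===== CLAIM (what is proved, stated in full; the proofs are below) =====
def Claim_equal_bounded_tree_search_vertex_cover : Prop := ∀ (edges : List (Int × Int × Int)) (k : Int) (cover : List Int), Dom_bounded_tree_search_vertex_cover edges k cover → Spec_bounded_tree_search_vertex_cover edges k cover (bounded_tree_search_vertex_cover edges k cover)

-- ===== LEMMAS AND PROOFS =====

-- A empty edge list always succeeds in A's recursion
lemma pvGoA_nil (k : Int) (cover : List Int) : pvGoA [] k cover = true := by
  rw [pvGoA]; by_cases h : k == 0 <;> simp [h]

-- the stack loop processes its top frame exactly as A's recursion does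
lemma pvGoB_cons (n : Nat) : ∀ (es : List ((Int × Int) × Int)), es.length ≤ n →
    ∀ (k : Int) (cover : List Int) (stack : List (List ((Int × Int) × Int) × Int)),
    pvGoB ((es, k) :: stack) = (pvGoA es k cover || pvGoB stack) := by
  induction n with
  | zero =>
    intro es hes k cover stack
    have : es = [] := List.eq_nil_of_length_eq_zero (Nat.le_zero.mp hes)
    subst this
    rw [pvGoB, pvGoA_nil]
    by_cases h : k == 0 <;> simp [h]
  | succ n ih =>
    intro es hes k cover stack
    rcases heq : es.getLast? with _ | ⟨⟨u, v⟩, w⟩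
    · have : es = [] := by
        cases es with
        | nil => rfl
        | cons a t => simp at heq
      subst this
      rw [pvGoB, pvGoA_nil]
      by_cases h : k == 0 <;> simp [h]
    · have hne : es ≠ [] := by
        intro h; subst h; simp at heq
      have hlen : 0 < es.length := List.length_pos_iff.mpr hne
      rw [pvGoB, pvGoA]
      by_cases hk : k == 0
      · simp [hk, Nat.ne_of_gt hlen]
      · have hlen0 : ¬ (es.length == 0) = true := by simp; omega
        simp only [hk, hlen0, Bool.false_eq_true, if_false]
        have hu : (es.dropLast.filter (fun e => !(e.1.1 == u || e.1.2 == u))).length ≤ n := by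
          refine le_trans (List.length_filter_le _ _) ?_
          rw [List.length_dropLast]; omega
        have hv : (es.dropLast.filter (fun e => !(e.1.1 == v || e.1.2 == v))).length ≤ n := by
          refine le_trans (List.length_filter_le _ _) ?_
          rw [List.length_dropLast]; omega
        split
        · rename_i h0
          rw [h0] at heq; cases heq
        · rename_i u' v' w' h'
          rw [h'] at heq
          obtain ⟨⟨rfl, rfl⟩, rfl⟩ : (u' = u ∧ v' = v) ∧ w' = w := by simpa using heq
          rw [ih _ hu (k - 1) (PySem.Set.add cover u'),
              ih _ hv (k - 1) (PySem.Set.add cover v') stack]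
          simp [Bool.or_assoc]

-- ===== VERDICT (by name: the statement is the Claim_ definition above) =====
theorem bounded_tree_search_vertex_cover_spec : Claim_equal_bounded_tree_search_vertex_cover := by
  intro edges k cover _
  unfold Spec_bounded_tree_search_vertex_cover bounded_tree_search_vertex_cover bounded_tree_search_vertex_cover_alt
  rw [pvGoB_cons (pvToDict edges).length _ le_rfl k cover []]
  rw [pvGoB]
  simp
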